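-- pv_equiv track=rewrite | github.com/weber81/DailyProgrammerSolutions | splurthianChem.py | SplurthianChemBonus1v1
-- ===== SOURCE A (Python) =====
-- def SplurthianChemBonus1v1(element):
--     element = element.lower()
--     startCharIndex = 0
--
--     #Find the earliest letter in the string (Minus the last character)
--     for char in range(ord("a"), ord("z")+1):
--         if chr(char) in element[:len(element)-1]:
--             startCharIndex = element.index(chr(char))
--             break
--
--     #Find the earliest letter alphabetically after the first letter
--     for char in range(ord("a"), ord("z")+1):
--         if chr(char) in element[startCharIndex+1:]:
--             return element[startCharIndex].upper() + chr(char)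
-- ===== SOURCE B (Python) =====
-- LETTERS = 'abcdefghijklmnopqrstuvwxyz'
--
-- def SplurthianChemBonus1v1(element):
--     element = element.lower()
--     pre = [c for c in element[:-1] if c in LETTERS]
--     i = element.index(min(pre)) if pre else 0
--     suf = [c for c in element[i + 1:] if c in LETTERS]
--     if suf:
--         return element[i].upper() + min(suf)
--     return None
-- ===== Notes on version B (the rewrite author's own statement) =====
-- stated objective: simpler
-- what changed: Replaced the two 26-iteration alphabet-scanning loops with direct minimum-over-filtered-letters logic: take min of the letters in element[:-1] for the start index, min of the letters after it for the second symbol character.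
import Mathlib
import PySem

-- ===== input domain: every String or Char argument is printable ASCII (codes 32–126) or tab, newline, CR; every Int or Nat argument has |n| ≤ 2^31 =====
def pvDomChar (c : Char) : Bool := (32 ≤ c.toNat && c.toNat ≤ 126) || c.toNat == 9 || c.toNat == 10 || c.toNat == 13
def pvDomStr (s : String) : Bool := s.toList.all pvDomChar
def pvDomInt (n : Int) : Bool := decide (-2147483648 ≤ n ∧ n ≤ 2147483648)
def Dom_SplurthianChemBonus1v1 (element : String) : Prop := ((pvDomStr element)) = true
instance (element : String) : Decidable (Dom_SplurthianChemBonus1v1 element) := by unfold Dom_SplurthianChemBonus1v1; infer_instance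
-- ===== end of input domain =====

-- B replaces A's two alphabet-scanning loops by taking minima over the letters of the
-- relevant substrings directly (objective: simpler).

-- ===== PORT A =====
def pvChr (n : Int) : Char := Char.ofNat n.toNat

-- first for-loop: first alphabet letter found in element[:len(element)-1] sets startCharIndex and breaks
def pvLoop1 (codes : List Int) (l : List Char) : Nat :=
  match codes with
  | [] => 0
  | c :: rest =>
    if pvChr c ∈ PySem.List.slice l none (some ((l.length : Int) - 1)) then
      (PySem.List.index? l (pvChr c)).getD 0
    else pvLoop1 rest l

-- second for-loop: first alphabet letter found in element[startCharIndex+1:] yields the return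
def pvLoop2 (codes : List Int) (l : List Char) (start : Nat) : Option String :=
  match codes with
  | [] => none
  | c :: rest =>
    if pvChr c ∈ PySem.List.slice l (some ((start : Int) + 1)) none then
      some (String.ofList [PySem.Chars.upperChar (PySem.List.pyGetD l (start : Int) ' '), pvChr c])
    else pvLoop2 rest l start

def SplurthianChemBonus1v1 (element : String) : Option String :=
  let l := PySem.Chars.lower element.toList
  let start := pvLoop1 (PySem.List.pyRange 97 123 1) l
  pvLoop2 (PySem.List.pyRange 97 123 1) l start

-- ===== PORT B =====
def pvLETTERS : List Char := "abcdefghijklmnopqrstuvwxyz".toList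

def SplurthianChemBonus1v1_alt (element : String) : Option String :=
  let l := PySem.Chars.lower element.toList
  let pre := l.dropLast.filter (fun c => decide (c ∈ pvLETTERS))
  let i := match PySem.List.min? pre (fun c => c) with
           | some m => (PySem.List.index? l m).getD 0
           | none => 0
  let suf := (l.drop (i + 1)).filter (fun c => decide (c ∈ pvLETTERS))
  match PySem.List.min? suf (fun c => c) with
  | some m => some (String.ofList [PySem.Chars.upperChar (PySem.List.pyGetD l (i : Int) ' '), m])
  | none => none

-- ===== PRECONDITION & SPEC =====
def Spec_SplurthianChemBonus1v1 (element : String) (out : Option String) : Prop := out = SplurthianChemBonus1v1_alt element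
instance (element : String) (out : Option String) : Decidable (Spec_SplurthianChemBonus1v1 element out) := by unfold Spec_SplurthianChemBonus1v1; infer_instance

-- ===== CLAIM (what is proved, stated in full; the proofs are below) =====
def Claim_equal_SplurthianChemBonus1v1 : Prop := ∀ (element : String), Dom_SplurthianChemBonus1v1 element → Spec_SplurthianChemBonus1v1 element (SplurthianChemBonus1v1 element)

-- ===== LEMMAS AND PROOFS =====

-- first hit of a strictly increasing candidate list inside S is the minimum of S's candidates
lemma find_mem_eq_min (cs S : List Char) (h : cs.Pairwise (· < ·)) :
    cs.find? (fun c => decide (c ∈ S)) =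
      PySem.List.min? (S.filter (fun c => decide (c ∈ cs))) (fun c => c) := by
  induction cs with
  | nil =>
    simp
    exact ((PySem.List.min?_eq_none_iff _ _).mpr rfl).symm
  | cons c rest ih =>
    rcases List.pairwise_cons.mp h with ⟨hlt, hrest⟩
    by_cases hc : c ∈ S
    · rw [List.find?_cons_of_pos (by simpa using hc)]
      have hmemf : c ∈ S.filter (fun x => decide (x ∈ c :: rest)) := by
        simp [List.mem_filter, hc]
      obtain ⟨m, hm⟩ : ∃ m, PySem.List.min? (S.filter (fun x => decide (x ∈ c :: rest))) (fun x => x) = some m := by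
        cases hmin : PySem.List.min? (S.filter (fun x => decide (x ∈ c :: rest))) (fun x => x) with
        | none => rw [PySem.List.min?_eq_none_iff] at hmin; rw [hmin] at hmemf; simp at hmemf
        | some m => exact ⟨m, rfl⟩
      have hmmem := PySem.List.min?_mem hm
      have hmin := PySem.List.min?_isMin hm c hmemf
      have hcm : c ≤ m := by
        rcases List.mem_filter.mp hmmem with ⟨_, hmc⟩
        rcases List.mem_cons.mp (of_decide_eq_true hmc) with h1 | h2
        · exact le_of_eq h1.symm
        · exact le_of_lt (hlt m h2)
      rw [hm, le_antisymm hmin hcm]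
    · rw [List.find?_cons_of_neg (by simpa using hc)]
      rw [ih hrest]
      congr 1
      apply List.filter_congr
      intro x hx
      have hxc : x ≠ c := fun e => hc (e ▸ hx)
      simp [List.mem_cons, hxc]

lemma pvLoop1_eq (codes : List Int) (l : List Char) :
    pvLoop1 codes l =
      match codes.find? (fun c => decide (pvChr c ∈ PySem.List.slice l none (some ((l.length : Int) - 1)))) with
      | some c => (PySem.List.index? l (pvChr c)).getD 0
      | none => 0 := by
  induction codes with
  | nil => rfl
  | cons c rest ih =>
    by_cases hc : pvChr c ∈ PySem.List.slice l none (some ((l.length : Int) - 1))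
    · rw [List.find?_cons_of_pos (by simpa using hc)]
      simp [pvLoop1, hc]
    · rw [List.find?_cons_of_neg (by simpa using hc)]
      simpa [pvLoop1, hc] using ih

lemma pvLoop2_eq (codes : List Int) (l : List Char) (start : Nat) :
    pvLoop2 codes l start =
      match codes.find? (fun c => decide (pvChr c ∈ PySem.List.slice l (some ((start : Int) + 1)) none)) with
      | some c => some (String.ofList [PySem.Chars.upperChar (PySem.List.pyGetD l (start : Int) ' '), pvChr c])
      | none => none := by
  induction codes with
  | nil => rfl
  | cons c rest ih =>
    by_cases hc : pvChr c ∈ PySem.List.slice l (some ((start : Int) + 1)) none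
    · rw [List.find?_cons_of_pos (by simpa using hc)]
      simp [pvLoop2, hc]
    · rw [List.find?_cons_of_neg (by simpa using hc)]
      simpa [pvLoop2, hc] using ih

lemma pyRange_map_chr : (PySem.List.pyRange 97 123 1).map pvChr = pvLETTERS := by decide

lemma letters_sorted : pvLETTERS.Pairwise (· < ·) := by decide

-- find? over the code range equals min? over the letters of S
lemma range_find_eq_min (S : List Char) :
    ((PySem.List.pyRange 97 123 1).find? (fun c => decide (pvChr c ∈ S))).map pvChr =
      PySem.List.min? (S.filter (fun c => decide (c ∈ pvLETTERS))) (fun c => c) := by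
  rw [← find_mem_eq_min _ _ letters_sorted, ← pyRange_map_chr, List.find?_map]
  rfl

lemma slice_prefix_eq (l : List Char) :
    PySem.List.slice l none (some ((l.length : Int) - 1)) = l.dropLast := by
  cases l with
  | nil => simpa using PySem.List.slice_to_neg_one (xs := ([] : List Char))
  | cons a t =>
    have : ((a :: t).length : Int) - 1 = ((t.length : Nat) : Int) := by
      simp
    rw [this, PySem.List.slice_to_natCast]
    simp [List.dropLast_eq_take]

lemma slice_suffix_eq (l : List Char) (i : Nat) :
    PySem.List.slice l (some ((i : Int) + 1)) none = l.drop (i + 1) := by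
  have : ((i : Int) + 1) = (((i + 1 : Nat)) : Int) := by push_cast; ring
  rw [this, PySem.List.slice_from_natCast]

-- A's first loop computes B's start index
lemma loop1_min (l : List Char) :
    pvLoop1 (PySem.List.pyRange 97 123 1) l =
      match PySem.List.min? (l.dropLast.filter (fun c => decide (c ∈ pvLETTERS))) (fun c => c) with
      | some m => (PySem.List.index? l m).getD 0
      | none => 0 := by
  rw [pvLoop1_eq]
  simp only [slice_prefix_eq]
  rw [← range_find_eq_min]
  cases (PySem.List.pyRange 97 123 1).find? (fun c => decide (pvChr c ∈ l.dropLast)) <;> rfl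

-- A's second loop computes B's suffix minimum result
lemma loop2_min (l : List Char) (i : Nat) :
    pvLoop2 (PySem.List.pyRange 97 123 1) l i =
      match PySem.List.min? ((l.drop (i + 1)).filter (fun c => decide (c ∈ pvLETTERS))) (fun c => c) with
      | some m => some (String.ofList [PySem.Chars.upperChar (PySem.List.pyGetD l (i : Int) ' '), m])
      | none => none := by
  rw [pvLoop2_eq]
  simp only [slice_suffix_eq]
  rw [← range_find_eq_min]
  cases (PySem.List.pyRange 97 123 1).find? (fun c => decide (pvChr c ∈ l.drop (i + 1))) <;> rfl

-- ===== VERDICT (by name: the statement is the Claim_ definition above) =====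
theorem SplurthianChemBonus1v1_spec : Claim_equal_SplurthianChemBonus1v1 := by
  intro element _
  unfold Spec_SplurthianChemBonus1v1 SplurthianChemBonus1v1 SplurthianChemBonus1v1_alt
  show pvLoop2 _ _ _ = _
  rw [loop1_min, loop2_min]
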